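-- pv_equiv track=rewrite | github.com/Wenszel/agh-introduction-to-computer-science | set_02/t_05.py | is_divisible
-- ===== SOURCE A (Python) =====
-- def int_len(n):
--     length = 0
--     while n > 0:
--         n //= 10
--         length += 1
--     return length
--
-- def is_divisible(n, d, mask):
--     output = 0
--     length = int_len(n)
--     p = 1
--     for _ in range(length):
--         if mask % 10 == 1:
--             output += (n % 10) * p
--             p *= 10
--         mask //= 10
--         n //= 10
--     return output % d == 0
-- ===== SOURCE B (Python) =====
-- def is_divisible(n, d, mask):
--     def sel(n, mask):
--         if n <= 0:
--             return 0
--         r = sel(n // 10, mask // 10)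
--         return r * 10 + n % 10 if mask % 10 == 1 else r
--     return sel(n, mask) % d == 0
-- ===== Notes on version B (the rewrite author's own statement) =====
-- stated objective: simpler
-- what changed: Replaced the digit-count precomputation (int_len) and the iterative loop with an explicit place-value accumulator p by a single direct recursion on n that composes the selected digits Horner-style (r*10 + digit).
import Mathlib
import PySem

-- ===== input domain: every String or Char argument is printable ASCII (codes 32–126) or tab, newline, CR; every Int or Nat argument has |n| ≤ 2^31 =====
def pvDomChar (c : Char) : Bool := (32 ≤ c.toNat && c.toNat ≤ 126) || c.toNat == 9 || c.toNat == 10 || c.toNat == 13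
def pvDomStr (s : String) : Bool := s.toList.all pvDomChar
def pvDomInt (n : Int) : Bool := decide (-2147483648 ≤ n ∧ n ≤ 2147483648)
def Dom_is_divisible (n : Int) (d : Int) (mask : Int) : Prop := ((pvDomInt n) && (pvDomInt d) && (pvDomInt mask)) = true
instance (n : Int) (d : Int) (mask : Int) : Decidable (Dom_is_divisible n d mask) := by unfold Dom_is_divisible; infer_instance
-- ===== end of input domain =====

-- B replaces A's digit-count precomputation + place-value-accumulator loop by one direct
-- Horner-style recursion on n; objective: simpler (not faster).


-- ===== PORT A =====
-- int_len of Source A (while n > 0: n //= 10; length += 1)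
def intLenA (n : Int) : Int :=
  if h : 0 < n then intLenA (PySem.Int.floordiv n 10) + 1 else 0
termination_by n.toNat
decreasing_by
  rw [PySem.Int.floordiv_eq_ediv_of_pos (by norm_num : (0:Int) < 10)]
  omega

-- the body of 'for _ in range(length)', iterated 'length' times on state (output, p, mask, n)
def loopA : Nat → Int × Int × Int × Int → Int × Int × Int × Int
  | 0, s => s
  | k + 1, (output, p, mask, n) =>
      let op : Int × Int :=
        if PySem.Int.mod mask 10 = 1 then (output + PySem.Int.mod n 10 * p, p * 10)
        else (output, p)
      loopA k (op.1, op.2, PySem.Int.floordiv mask 10, PySem.Int.floordiv n 10)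

def is_divisible (n : Int) (d : Int) (mask : Int) : Bool :=
  let output : Int := 0
  let length := intLenA n
  let p : Int := 1
  let s := loopA length.toNat (output, p, mask, n)
  PySem.Int.mod s.1 d == 0

-- ===== PORT B =====
-- sel of Source B: recursion on n, Horner composition of the mask-selected digits
def selB (n : Int) (mask : Int) : Int :=
  if h : n ≤ 0 then 0
  else
    let r := selB (PySem.Int.floordiv n 10) (PySem.Int.floordiv mask 10)
    if PySem.Int.mod mask 10 = 1 then r * 10 + PySem.Int.mod n 10 else r
termination_by n.toNat
decreasing_by
  rw [PySem.Int.floordiv_eq_ediv_of_pos (by norm_num : (0:Int) < 10)]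
  omega

def is_divisible_alt (n : Int) (d : Int) (mask : Int) : Bool :=
  PySem.Int.mod (selB n mask) d == 0

-- ===== PRECONDITION & SPEC =====
-- Python's 'output % d == 0' raises ZeroDivisionError for d = 0; nothing else raises.
def Pre_is_divisible (n : Int) (d : Int) (mask : Int) : Prop := d ≠ 0
instance (n : Int) (d : Int) (mask : Int) : Decidable (Pre_is_divisible n d mask) := by unfold Pre_is_divisible; infer_instance
def pvWitness_is_divisible : Int × Int × Int := (123, 3, 101)

def Spec_is_divisible (n : Int) (d : Int) (mask : Int) (out : Bool) : Prop := out = is_divisible_alt n d mask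
instance (n : Int) (d : Int) (mask : Int) (out : Bool) : Decidable (Spec_is_divisible n d mask out) := by unfold Spec_is_divisible; infer_instance

-- ===== CLAIM (what is proved, stated in full; the proofs are below) =====
def Claim_equal_is_divisible : Prop := ∀ (n : Int) (d : Int) (mask : Int), Dom_is_divisible n d mask → Pre_is_divisible n d mask → Spec_is_divisible n d mask (is_divisible n d mask)

-- ===== LEMMAS AND PROOFS =====

theorem intLenA_nonneg (n : Int) : 0 ≤ intLenA n := by
  fun_induction intLenA n with
  | case1 n h ih => omega
  | case2 n h => simp

theorem intLenA_eq_zero (n : Int) (h : ¬ 0 < n) : intLenA n = 0 := by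
  rw [intLenA]; simp [h]

theorem intLenA_pos_step (n : Int) (h : 0 < n) :
    intLenA n = intLenA (PySem.Int.floordiv n 10) + 1 := by
  rw [intLenA]; simp [h]

theorem selB_nonpos (n mask : Int) (h : n ≤ 0) : selB n mask = 0 := by
  rw [selB]; simp [h]

theorem selB_pos (n mask : Int) (h : ¬ n ≤ 0) :
    selB n mask =
      if PySem.Int.mod mask 10 = 1 then
        selB (PySem.Int.floordiv n 10) (PySem.Int.floordiv mask 10) * 10 + PySem.Int.mod n 10
      else selB (PySem.Int.floordiv n 10) (PySem.Int.floordiv mask 10) := by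
  rw [selB]; simp [h]

theorem loopA_spec : ∀ (k : Nat) (output p mask n : Int), intLenA n = (k : Int) →
    (loopA k (output, p, mask, n)).1 = output + p * selB n mask := by
  intro k
  induction k with
  | zero =>
    intro output p mask n hlen
    have hn : n ≤ 0 := by
      by_contra hpos
      have := intLenA_pos_step n (by omega)
      have := intLenA_nonneg (PySem.Int.floordiv n 10)
      omega
    simp [loopA, selB_nonpos n mask hn]
  | succ k ih =>
    intro output p mask n hlen
    have hpos : 0 < n := by
      by_contra hnp
      rw [intLenA_eq_zero n hnp] at hlen
      omega
    have hrec : intLenA (PySem.Int.floordiv n 10) = (k : Int) := by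
      have := intLenA_pos_step n hpos
      push_cast at hlen ⊢
      omega
    rw [selB_pos n mask (by omega)]
    by_cases hm : PySem.Int.mod mask 10 = 1
    · simp only [loopA, hm, if_pos]
      rw [ih _ _ _ _ hrec]
      ring
    · simp only [loopA, hm, if_false]
      rw [ih _ _ _ _ hrec]

-- ===== VERDICT (by name: the statement is the Claim_ definition above) =====
theorem is_divisible_spec : Claim_equal_is_divisible := by
  intro n d mask _ _
  have hk : intLenA n = (((intLenA n).toNat : Nat) : Int) := by
    have := intLenA_nonneg n; omega
  have h := loopA_spec (intLenA n).toNat 0 1 mask n hk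
  unfold Spec_is_divisible
  simp only [is_divisible, is_divisible_alt, h, zero_add, one_mul]
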